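-- pv_equiv track=rewrite | github.com/malakaljamri/My_Projects | Algorithm_Q/malak.py | malak
-- ===== SOURCE A (Python) =====
-- def malak(array):
--
--   if len(array) == 1:
--     return True
--   else:
--     mid = len(array) // 2
--     left = malak(array[:mid])
--     right = malak(array[mid:])
--
--     return left and right and array[mid - 1] % 2 != array[mid] % 2
-- ===== SOURCE B (Python) =====
-- def malak(array):
--     return all(x % 2 != y % 2 for x, y in zip(array, array[1:]))
-- ===== Notes on version B (the rewrite author's own statement) =====
-- stated objective: faster
-- what changed: Replaced the divide-and-conquer recursion (which slices the list at each level) by a single linear scan over adjacent pairs checking parity alternation.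
-- crash fix: On the empty list A recurses forever (RecursionError); B returns True (vacuously alternating). — e.g. on malak([]): A raises RecursionError, B returns true
import Mathlib
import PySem

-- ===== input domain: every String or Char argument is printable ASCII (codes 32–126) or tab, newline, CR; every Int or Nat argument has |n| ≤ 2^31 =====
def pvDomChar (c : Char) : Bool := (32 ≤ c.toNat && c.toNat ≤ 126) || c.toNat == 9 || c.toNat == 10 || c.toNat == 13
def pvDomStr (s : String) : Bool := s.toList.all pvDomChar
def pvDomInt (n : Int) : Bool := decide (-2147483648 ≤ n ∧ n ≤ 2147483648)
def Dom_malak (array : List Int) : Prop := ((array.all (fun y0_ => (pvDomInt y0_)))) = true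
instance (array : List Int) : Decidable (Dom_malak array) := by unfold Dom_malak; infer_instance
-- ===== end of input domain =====

-- B replaces A's divide-and-conquer (with list slicing at every level) by one linear scan of adjacent pairs; the proof covers the return value on nonempty lists.

-- ===== PORT A =====
def malak (array : List Int) : Bool :=
  if array.length = 1 then true
  else if _h0 : array.length = 0 then true  -- totality guard: Python recurses forever on []; excluded by Pre_malak
  else
    let mid : Nat := array.length / 2       -- len(array) // 2 (length is a Nat, so Nat division = Python floor division)
    malak (PySem.List.slice array none (some (mid : Int))) &&
      (malak (PySem.List.slice array (some (mid : Int)) none) &&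
        decide (PySem.Int.mod (PySem.List.pyGetD array ((mid : Int) - 1) 0) 2 ≠
                PySem.Int.mod (PySem.List.pyGetD array (mid : Int) 0) 2))
termination_by array.length
decreasing_by
  · rw [PySem.List.slice_to_natCast]; simp only [List.length_take]; omega
  · rw [PySem.List.slice_from_natCast]; simp only [List.length_drop]; omega

-- ===== PORT B =====
def malak_alt (array : List Int) : Bool :=
  (array.zip (PySem.List.slice array (some 1) none)).all
    (fun p => decide (PySem.Int.mod p.1 2 ≠ PySem.Int.mod p.2 2))

-- ===== PRECONDITION & SPEC =====
-- Pre_ excludes only the empty list, on which Python A recurses forever (RecursionError).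
def Pre_malak (array : List Int) : Prop := array ≠ []
instance (array : List Int) : Decidable (Pre_malak array) := by unfold Pre_malak; infer_instance
def pvWitness_malak : List Int := [1, 2, 3]

-- On the empty list A recurses forever (RecursionError); B returns True (vacuously alternating).
def Raises_malak (array : List Int) : Prop := array = []
instance (array : List Int) : Decidable (Raises_malak array) := by unfold Raises_malak; infer_instance
def pvRaiseWitness_malak : List Int := []
def pvRaiseWitnessOut_malak : Bool := true

def Spec_malak (array : List Int) (out : Bool) : Prop := out = malak_alt array
instance (array : List Int) (out : Bool) : Decidable (Spec_malak array out) := by unfold Spec_malak; infer_instance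

-- ===== CLAIM (what is proved, stated in full; the proofs are below) =====
def Claim_equal_malak : Prop := ∀ (array : List Int), Dom_malak array → Pre_malak array → Spec_malak array (malak array)
def Claim_raises_malak : Prop := (∀ (array : List Int), Dom_malak array → Raises_malak array → ¬ Pre_malak array) ∧ (Dom_malak (pvRaiseWitness_malak) ∧ Raises_malak (pvRaiseWitness_malak) ∧ malak_alt (pvRaiseWitness_malak) = pvRaiseWitnessOut_malak)

-- ===== LEMMAS AND PROOFS =====

-- adjacency chain: the value B computes, in recursive form
def chain : List Int → Bool
  | a :: b :: t => (decide (PySem.Int.mod a 2 ≠ PySem.Int.mod b 2)) && chain (b :: t)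
  | _ => true

theorem alt_eq_chain (xs : List Int) : malak_alt xs = chain xs := by
  unfold malak_alt
  rw [PySem.List.slice_from_one]
  induction xs with
  | nil => rfl
  | cons a ys ih =>
    cases ys with
    | nil => rfl
    | cons b t =>
      simp only [List.tail_cons, List.zip_cons_cons, List.all_cons, chain]
      simp only [List.tail_cons] at ih
      rw [← ih]

theorem chain_append (l r : List Int) (hl : l ≠ []) (hr : r ≠ []) :
    chain (l ++ r) =
      ((chain l && chain r) &&
        decide (PySem.Int.mod l.getLast! 2 ≠ PySem.Int.mod r.head! 2)) := by
  induction l with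
  | nil => exact absurd rfl hl
  | cons a l' ih =>
    cases l' with
    | nil =>
      cases r with
      | nil => exact absurd rfl hr
      | cons b t =>
        simp only [List.cons_append, List.nil_append, chain, List.getLast!, List.head!]
        cases chain (b :: t) <;> simp [Bool.and_comm]
    | cons c l'' =>
      have h1 : (c :: l'') ≠ [] := by simp
      have := ih h1
      simp only [List.cons_append, chain] at *
      rw [this]
      have hlast : (a :: c :: l'').getLast! = (c :: l'').getLast! := by
        rw [List.getLast!_eq_getLast?_getD, List.getLast!_eq_getLast?_getD, List.getLast?_cons_cons]
      rw [hlast]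
      cases decide (PySem.Int.mod a 2 ≠ PySem.Int.mod c 2) <;>
        cases chain (c :: l'') <;> cases chain r <;>
        cases decide (PySem.Int.mod (c :: l'').getLast! 2 ≠ PySem.Int.mod r.head! 2) <;> rfl

theorem malak_eq_chain : ∀ (n : Nat) (xs : List Int), xs.length ≤ n → xs ≠ [] → malak xs = chain xs := by
  intro n
  induction n with
  | zero => intro xs h hne; cases xs with
    | nil => exact absurd rfl hne
    | cons a t => simp at h
  | succ n ih =>
    intro xs hlen hne
    by_cases h1 : xs.length = 1
    · cases xs with
      | nil => exact absurd rfl hne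
      | cons a t =>
        cases t with
        | nil => rw [malak]; simp [chain]
        | cons b t' => simp at h1
    · have h0 : xs.length ≠ 0 := by simp [List.length_eq_zero_iff]; exact hne
      have h2 : 2 ≤ xs.length := by omega
      rw [malak]
      simp only [h1, h0, if_false]
      set mid : Nat := xs.length / 2 with hmid
      have hm1 : 1 ≤ mid := by omega
      have hmlt : mid < xs.length := by omega
      rw [PySem.List.slice_to_natCast, PySem.List.slice_from_natCast]
      have hlt : (xs.take mid).length = mid := by simp; omega
      have hrt : (xs.drop mid).length = xs.length - mid := by simp
      have hlne : xs.take mid ≠ [] := by intro h; rw [h] at hlt; simp at hlt; omega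
      have hrne : xs.drop mid ≠ [] := by intro h; rw [h] at hrt; simp at hrt; omega
      rw [ih _ (by omega) hlne, ih _ (by omega) hrne]
      have hsplit : xs = xs.take mid ++ xs.drop mid := (List.take_append_drop mid xs).symm
      conv_rhs => rw [hsplit]
      rw [chain_append _ _ hlne hrne]
      -- the junction indices: xs[mid-1] is the last of the left half, xs[mid] the head of the right half
      have e1 : PySem.List.pyGetD xs ((mid : Int) - 1) 0 = (xs.take mid).getLast! := by
        have : ((mid : Int) - 1) = ((mid - 1 : Nat) : Int) := by omega
        rw [this, PySem.List.pyGetD_natCast]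
        have hidx : mid - 1 < xs.length := by omega
        rw [List.getD_eq_getElem _ _ hidx]
        have hidx2 : mid - 1 < (xs.take mid).length := by omega
        rw [List.getLast!_eq_getLast?_getD, List.getLast?_eq_getElem?, hlt,
          List.getElem?_eq_getElem (by omega)]
        simp only [Option.getD_some]
        rw [List.getElem_take]
      have e2 : PySem.List.pyGetD xs (mid : Int) 0 = (xs.drop mid).head! := by
        rw [PySem.List.pyGetD_natCast]
        rw [List.getD_eq_getElem _ _ hmlt]
        have : (xs.drop mid).head! = (xs.drop mid).head hrne := by
          rw [List.head!_eq_head?_getD, List.head?_eq_some_head hrne]; rfl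
        rw [this, List.head_drop]
      rw [e1, e2]
      simp [Bool.and_assoc]

-- ===== VERDICT (by name: the statement is the Claim_ definition above) =====
theorem malak_spec : Claim_equal_malak := by
  intro array _ hpre
  unfold Spec_malak
  rw [alt_eq_chain, malak_eq_chain array.length array le_rfl hpre]

@[simp] theorem malak_raises : Claim_raises_malak := by
  unfold Claim_raises_malak
  exact ⟨fun a _ hr hp => hp hr, by decide⟩
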